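-- pv_equiv track=rewrite | github.com/nriyer/Rex | keyword_scorer.py | get_matched_keywords_by_category
-- ===== SOURCE A (Python) =====
-- from typing import List,Dict
--
-- def get_matched_keywords_by_category(
--     classified_keywords: Dict[str, List[str]],
--     matched_keywords: List[str]
-- ) -> Dict[str, List[str]]:
--     """
--     Return which matched keywords belong to which category.
--     """
--     matched_set = set(k.lower().strip() for k in matched_keywords)
--     categorized = {}
--
--     for category, keywords in classified_keywords.items():
--         category_keywords = set(k.lower().strip() for k in keywords)
--         matches = category_keywords & matched_set
--         categorized[category] = sorted(matches)
--
--     return categorized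
-- ===== SOURCE B (Python) =====
-- def get_matched_keywords_by_category(classified_keywords, matched_keywords):
--     """
--     Return which matched keywords belong to which category.
--     Inverted-index formulation: index each normalized keyword to the set of
--     categories containing it, then drive the traversal by the matched keywords.
--     """
--     pairs = [(k.lower().strip(), category)
--              for category, keywords in classified_keywords.items()
--              for k in keywords]
--     index = {}
--     for nk, category in pairs:
--         index.setdefault(nk, set()).add(category)
--
--     result = {category: set() for category in classified_keywords}
--     for nm in set(m.lower().strip() for m in matched_keywords):
--         for category in index.get(nm, ()):
--             result[category].add(nm)
--
--     return {category: sorted(s) for category, s in result.items()}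
-- ===== Notes on version B (the rewrite author's own statement) =====
-- stated objective: alternative
-- what changed: Replaces the per-category set intersection with an inverted index (normalized keyword -> categories) plus pre-initialized empty result sets, driving the traversal by the matched keywords instead of intersecting each category's keyword set.
import Mathlib
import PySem

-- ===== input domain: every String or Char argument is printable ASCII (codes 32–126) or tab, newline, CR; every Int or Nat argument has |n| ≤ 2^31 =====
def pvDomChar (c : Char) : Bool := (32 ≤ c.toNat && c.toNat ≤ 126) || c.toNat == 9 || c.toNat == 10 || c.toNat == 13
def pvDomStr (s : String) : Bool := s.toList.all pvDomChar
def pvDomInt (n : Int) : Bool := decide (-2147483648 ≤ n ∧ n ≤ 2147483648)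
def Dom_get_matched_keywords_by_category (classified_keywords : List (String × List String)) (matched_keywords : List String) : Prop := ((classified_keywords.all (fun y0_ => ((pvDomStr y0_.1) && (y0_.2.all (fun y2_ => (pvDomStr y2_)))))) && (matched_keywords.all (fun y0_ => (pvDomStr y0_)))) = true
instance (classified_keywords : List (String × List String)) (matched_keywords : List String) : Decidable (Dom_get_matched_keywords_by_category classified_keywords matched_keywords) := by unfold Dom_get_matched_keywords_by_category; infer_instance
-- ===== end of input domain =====

-- B replaces the per-category set intersections by an inverted index (normalized keyword -> categories)
-- driven by the matched keywords: an alternative decomposition of the same grouping (return value proved equal).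


-- k.lower().strip(), the normalization both programs apply
def pvNorm (s : String) : String := PySem.Str.strip (PySem.Str.lower s)

-- ===== PORT A =====
-- A's Python receives dicts; the association-list argument is read as the Python dict it denotes
-- (PySem.Dict.ofList = dict(pairs): duplicate keys collapse, last value wins, first position kept).
def get_matched_keywords_by_category (classified_keywords : List (String × List String)) (matched_keywords : List String) : List (String × List String) :=
  let matched_set : PySem.Set String := PySem.Set.ofList (matched_keywords.map pvNorm)
  let categorized := (PySem.Dict.ofList classified_keywords).items.foldl
    (fun cat p =>
      let category_keywords : PySem.Set String := PySem.Set.ofList (p.2.map pvNorm)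
      let pyMatches := PySem.Set.inter category_keywords matched_set
      cat.insert p.1 (PySem.List.sorted pyMatches (fun x => x) false))
    PySem.Dict.empty
  categorized.items

-- ===== PORT B =====
def get_matched_keywords_by_category_alt (classified_keywords : List (String × List String)) (matched_keywords : List String) : List (String × List String) :=
  let items := (PySem.Dict.ofList classified_keywords).items
  -- pairs = [(k.lower().strip(), category) for category, keywords in … for k in keywords]
  let pairs := items.flatMap (fun p => p.2.map (fun k => (pvNorm k, p.1)))
  -- for nk, category in pairs: index.setdefault(nk, set()).add(category)
  let index := pairs.foldl (fun d q => d.modify q.1 PySem.Set.empty (fun s => PySem.Set.add s q.2)) PySem.Dict.empty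
  -- result = {category: set() for category in classified_keywords}
  let result0 : PySem.Dict String (PySem.Set String) :=
    items.foldl (fun d p => d.insert p.1 PySem.Set.empty) PySem.Dict.empty
  -- for nm in set(m.lower().strip() for m in matched_keywords): for category in index.get(nm, ()): result[category].add(nm)
  let result := (PySem.Set.ofList (matched_keywords.map pvNorm)).foldl (fun d nm =>
      (index.getD nm PySem.Set.empty).foldl
        (fun d c => d.modify c PySem.Set.empty (fun s => PySem.Set.add s nm)) d)
    result0
  -- {category: sorted(s) for category, s in result.items()}
  result.items.map (fun p => (p.1, PySem.List.sorted p.2 (fun x => x) false))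

-- ===== PRECONDITION & SPEC =====
def Spec_get_matched_keywords_by_category (classified_keywords : List (String × List String)) (matched_keywords : List String) (out : List (String × List String)) : Prop := out = get_matched_keywords_by_category_alt classified_keywords matched_keywords
instance (classified_keywords : List (String × List String)) (matched_keywords : List String) (out : List (String × List String)) : Decidable (Spec_get_matched_keywords_by_category classified_keywords matched_keywords out) := by unfold Spec_get_matched_keywords_by_category; infer_instance

-- ===== CLAIM (what is proved, stated in full; the proofs are below) =====
def Claim_equal_get_matched_keywords_by_category : Prop := ∀ (classified_keywords : List (String × List String)) (matched_keywords : List String), Dom_get_matched_keywords_by_category classified_keywords matched_keywords → Spec_get_matched_keywords_by_category classified_keywords matched_keywords (get_matched_keywords_by_category classified_keywords matched_keywords)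

-- ===== LEMMAS AND PROOFS =====

-- in a key-Nodup association list, entries with equal keys are equal
theorem pv_eq_of_fst_eq_of_nodup {α β : Type} (l : List (α × β))
    (h : (l.map Prod.fst).Nodup) {p q : α × β}
    (hp : p ∈ l) (hq : q ∈ l) (hfst : p.1 = q.1) : p = q := by
  induction l with
  | nil => cases hp
  | cons a t ih =>
    simp only [List.map_cons, List.nodup_cons] at h
    rcases List.mem_cons.mp hp with rfl | hp' <;>
      rcases List.mem_cons.mp hq with rfl | hq'
    · rfl
    · exact absurd (hfst ▸ List.mem_map_of_mem hq') h.1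
    · exact absurd (hfst ▸ List.mem_map_of_mem hp') h.1
    · exact ih h.2 hp' hq'

-- the index-building loop 'index.setdefault(nk, set()).add(category)', seen through membership
theorem pv_index_mem (l : List (String × String)) (d : PySem.Dict String (PySem.Set String))
    (nm x : String) :
    (x ∈ (l.foldl (fun d q => d.modify q.1 PySem.Set.empty (fun s => PySem.Set.add s q.2)) d).getD nm PySem.Set.empty)
      ↔ x ∈ d.getD nm PySem.Set.empty ∨ (nm, x) ∈ l := by
  induction l generalizing d with
  | nil => simp
  | cons q t ih =>
    simp only [List.foldl_cons, ih, PySem.Dict.getD_modify, List.mem_cons, Prod.ext_iff]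
    by_cases h : nm = q.1 <;>
      simp only [h, if_true, if_false, PySem.Set.mem_add, true_and, false_and] <;> tauto

-- the inner 'for category in …: result[category].add(nm)' loop, seen through getD
theorem pv_inner_getD (nm : String) (cs : List String)
    (d : PySem.Dict String (PySem.Set String)) (c : String) :
    ((cs.foldl (fun d c => d.modify c PySem.Set.empty (fun s => PySem.Set.add s nm)) d).getD c PySem.Set.empty)
      = if c ∈ cs then PySem.Set.add (d.getD c PySem.Set.empty) nm
        else d.getD c PySem.Set.empty := by
  induction cs generalizing d with
  | nil => simp
  | cons c' t ih =>
    simp only [List.foldl_cons, ih, PySem.Dict.getD_modify, List.mem_cons]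
    by_cases h1 : c = c' <;> by_cases h2 : c ∈ t <;>
      simp [h1, h2]

-- the inner loop does not change the key set when every touched category is already a key
theorem pv_inner_keys (nm : String) (cs : List String)
    (d : PySem.Dict String (PySem.Set String))
    (h : ∀ c ∈ cs, c ∈ d.keys) :
    (cs.foldl (fun d c => d.modify c PySem.Set.empty (fun s => PySem.Set.add s nm)) d).keys = d.keys := by
  induction cs generalizing d with
  | nil => rfl
  | cons c' t ih =>
    have hc' : d.contains c' = true :=
      (PySem.Dict.contains_iff_mem_keys d c').mpr (h c' (List.mem_cons_self ..))
    have hk : (d.modify c' PySem.Set.empty (fun s => PySem.Set.add s nm)).keys = d.keys := by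
      rw [PySem.Dict.keys_modify, PySem.Dict.keys_insert_of_contains _ _ hc']
    simp only [List.foldl_cons]
    rw [ih _ (fun c hc => by rw [hk]; exact h c (List.mem_cons_of_mem _ hc)), hk]

-- the outer loop over the deduplicated matched keywords: key set unchanged
theorem pv_outer_keys (idx : PySem.Dict String (PySem.Set String)) (ms : List String)
    (d : PySem.Dict String (PySem.Set String))
    (h : ∀ nm : String, ∀ c ∈ idx.getD nm PySem.Set.empty, c ∈ d.keys) :
    ((ms.foldl (fun d nm =>
        (idx.getD nm PySem.Set.empty).foldl
          (fun d c => d.modify c PySem.Set.empty (fun s => PySem.Set.add s nm)) d) d).keys)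
      = d.keys := by
  induction ms generalizing d with
  | nil => rfl
  | cons m t ih =>
    have hk := pv_inner_keys m (idx.getD m PySem.Set.empty) d (h m)
    simp only [List.foldl_cons]
    rw [ih _ (fun nm c hc => by rw [hk]; exact h nm c hc), hk]

-- the outer loop over the deduplicated matched keywords: membership in a category's set
theorem pv_outer_mem (idx : PySem.Dict String (PySem.Set String)) (ms : List String)
    (d : PySem.Dict String (PySem.Set String)) (c : String) (x : String) :
    (x ∈ (ms.foldl (fun d nm =>
        (idx.getD nm PySem.Set.empty).foldl
          (fun d c => d.modify c PySem.Set.empty (fun s => PySem.Set.add s nm)) d) d).getD c PySem.Set.empty)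
      ↔ x ∈ d.getD c PySem.Set.empty
          ∨ ∃ nm ∈ ms, x = nm ∧ c ∈ idx.getD nm PySem.Set.empty := by
  induction ms generalizing d with
  | nil => simp
  | cons m t ih =>
    simp only [List.foldl_cons, ih, pv_inner_getD, List.mem_cons]
    by_cases hc : c ∈ idx.getD m PySem.Set.empty <;>
      simp only [hc, if_true, if_false, PySem.Set.mem_add] <;> constructor
    · rintro (((hx | rfl) | hrest))
      · exact Or.inl hx
      · exact Or.inr ⟨x, Or.inl rfl, rfl, hc⟩
      · rcases hrest with ⟨m', hm', hx, hcm'⟩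
        exact Or.inr ⟨m', Or.inr hm', hx, hcm'⟩
    · rintro (hx | ⟨m', (rfl | hm'), hx, hcm'⟩)
      · exact Or.inl (Or.inl hx)
      · exact Or.inl (Or.inr hx)
      · exact Or.inr ⟨m', hm', hx, hcm'⟩
    · rintro (hx | ⟨m', hm', hx, hcm'⟩)
      · exact Or.inl hx
      · exact Or.inr ⟨m', Or.inr hm', hx, hcm'⟩
    · rintro (hx | ⟨m', (rfl | hm'), hx, hcm'⟩)
      · exact Or.inl hx
      · exact absurd hcm' hc
      · exact Or.inr ⟨m', hm', hx, hcm'⟩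

-- the outer loop preserves Nodup of each category's set
theorem pv_outer_nodup (idx : PySem.Dict String (PySem.Set String)) (ms : List String)
    (d : PySem.Dict String (PySem.Set String)) (c : String)
    (h : (d.getD c PySem.Set.empty).Nodup) :
    ((ms.foldl (fun d nm =>
        (idx.getD nm PySem.Set.empty).foldl
          (fun d c => d.modify c PySem.Set.empty (fun s => PySem.Set.add s nm)) d) d).getD c PySem.Set.empty).Nodup := by
  induction ms generalizing d with
  | nil => exact h
  | cons m t ih =>
    simp only [List.foldl_cons]
    refine ih _ ?_
    rw [pv_inner_getD]
    split
    · exact PySem.Set.nodup_add _ _ h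
    · exact h

-- ===== VERDICT (by name: the statement is the Claim_ definition above) =====
theorem get_matched_keywords_by_category_spec : Claim_equal_get_matched_keywords_by_category := by
  intro ck mk _
  show _ = _
  simp only [get_matched_keywords_by_category, get_matched_keywords_by_category_alt]
  set its := (PySem.Dict.ofList ck).items with hits
  have hkeys : (PySem.Dict.ofList ck).keys = its.map Prod.fst := rfl
  have hnd : (its.map Prod.fst).Nodup := by
    have := PySem.Dict.nodup_keys_ofList (κ := String) (ν := List String) ck
    rwa [hkeys] at this
  -- A's dict of results: fresh inserts over the items list
  have hA : ∀ (v : String × List String → List String),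
      (its.foldl (fun cat p => cat.insert p.1 (v p)) PySem.Dict.empty).items
        = its.map (fun p => (p.1, v p)) := by
    intro v
    rw [PySem.Dict.items_foldl_insert_fresh its Prod.fst v PySem.Dict.empty
      (fun a _ => PySem.Dict.contains_empty a.1) hnd]
    rfl
  -- B's result0 likewise
  have hR0 : (its.foldl (fun d p => d.insert p.1 PySem.Set.empty) PySem.Dict.empty).items
      = its.map (fun p => (p.1, (PySem.Set.empty : PySem.Set String))) := by
    rw [PySem.Dict.items_foldl_insert_fresh its Prod.fst (fun _ => PySem.Set.empty) PySem.Dict.empty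
      (fun a _ => PySem.Dict.contains_empty a.1) hnd]
    rfl
  set pairs := its.flatMap (fun p => p.2.map (fun k => (pvNorm k, p.1))) with hpairs
  set idx := pairs.foldl (fun d q => d.modify q.1 PySem.Set.empty (fun s => PySem.Set.add s q.2)) PySem.Dict.empty with hidx
  have hidxMem : ∀ nm c, c ∈ idx.getD nm PySem.Set.empty ↔
      ∃ p' ∈ its, p'.1 = c ∧ ∃ k ∈ p'.2, pvNorm k = nm := by
    intro nm c
    rw [hidx, pv_index_mem, PySem.Dict.getD_empty]
    simp only [hpairs, List.mem_flatMap, List.mem_map, Prod.ext_iff]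
    constructor
    · rintro (hc | ⟨p', hp', k, hk, hnm, hc⟩)
      · cases hc
      · exact ⟨p', hp', hc, k, hk, hnm⟩
    · rintro ⟨p', hp', hc, k, hk, hnm⟩
      exact Or.inr ⟨p', hp', k, hk, hnm, hc⟩
  set R0 := its.foldl (fun d p => d.insert p.1 PySem.Set.empty) PySem.Dict.empty with hR0def
  have hR0keys : R0.keys = its.map Prod.fst := by
    show R0.items.map Prod.fst = _
    rw [hR0]; simp
  have hR0getD : ∀ p ∈ its, R0.getD p.1 PySem.Set.empty = PySem.Set.empty := by
    intro p hp
    refine PySem.Dict.getD_of_mem_items R0 ?_ ?_ _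
    · rw [hR0]; exact List.mem_map_of_mem hp
    · rw [hR0keys]; exact hnd
  set R := (PySem.Set.ofList (mk.map pvNorm)).foldl (fun d nm =>
      (idx.getD nm PySem.Set.empty).foldl
        (fun d c => d.modify c PySem.Set.empty (fun s => PySem.Set.add s nm)) d) R0 with hRdef
  have hRkeys : R.keys = its.map Prod.fst := by
    rw [hRdef, pv_outer_keys idx _ R0 ?_, hR0keys]
    intro nm c hc
    rw [hR0keys]
    rcases (hidxMem nm c).mp hc with ⟨p', hp', rfl, _⟩
    exact List.mem_map_of_mem hp'
  have hRitems : R.items = (its.map Prod.fst).map (fun c => (c, R.getD c PySem.Set.empty)) := by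
    rw [← hRkeys]
    exact PySem.Dict.items_eq_map_keys R (by rw [hRkeys]; exact hnd) _
  rw [hA, hRitems, List.map_map, List.map_map]
  refine List.map_congr_left ?_
  intro p hp
  simp only [Function.comp]
  refine congrArg (fun l => (p.1, l)) ?_
  -- sorted(intersection) = sorted(B's accumulated set): two Nodup lists with the same members
  rw [PySem.List.sorted_id_eq_sorted_id_iff_perm]
  rw [List.perm_ext_iff_of_nodup
    (PySem.Set.nodup_inter _ _ (PySem.Set.nodup_ofList _))
    (by rw [hRdef]; exact pv_outer_nodup idx _ R0 p.1 (by rw [hR0getD p hp]; exact List.nodup_nil))]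
  intro x
  rw [hRdef, pv_outer_mem, hR0getD p hp]
  simp only [PySem.Set.mem_inter, PySem.Set.mem_ofList, List.mem_map]
  constructor
  · rintro ⟨⟨k, hk, rfl⟩, m, hm, hmx⟩
    refine Or.inr ⟨pvNorm k, ⟨m, hm, hmx⟩, rfl,
      (hidxMem (pvNorm k) p.1).mpr ⟨p, hp, rfl, k, hk, rfl⟩⟩
  · rintro (hx | ⟨nm, ⟨m, hm, hmn⟩, rfl, hcm⟩)
    · cases hx
    · rcases (hidxMem x p.1).mp hcm with ⟨p', hp', hfst, k, hk, hkm⟩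
      have : p' = p := pv_eq_of_fst_eq_of_nodup its hnd hp' hp hfst
      subst this
      exact ⟨⟨k, hk, hkm⟩, ⟨m, hm, hmn⟩⟩
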